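-- pv_equiv track=rewrite | github.com/CaitlinMcNiff/PhD | scripts/af_diffs.py | map_cancer_type
-- ===== SOURCE A (Python) =====
-- def map_cancer_type(phenotype_raw: str) -> str:
--     if not isinstance(phenotype_raw, str):
--         return "Other/General"
--     p = phenotype_raw.lower()
--     if "prostate" in p: return "Prostate"
--     if "breast" in p: return "Breast"
--     if any(k in p for k in ["colorectal","colon","rectal","rectum","crc"]): return "Colorectal"
--     if any(k in p for k in ["ovarian","ovary"]): return "Ovarian"
--     if any(k in p for k in ["nsclc","non-small cell lung","small-cell lung","sclc","lung","bronchus"]): return "Lung"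
--     if any(k in p for k in ["skin","keratinocyte","non-melanoma","melanoma"]): return "Skin"
--     if any(k in p for k in ["gastric","stomach","cardia"]): return "Gastric"
--     if "pancrea" in p: return "Pancreatic"
--     if any(k in p for k in ["cervical","cervix"]): return "Cervical"
--     if "endometrial" in p: return "Endometrial"
--     if any(k in p for k in ["uterine","leiomyoma"]): return "Uterine"
--     if "bladder" in p: return "Bladder"
--     if any(k in p for k in ["kidney","renal","renal pelvis"]): return "Kidney"
--     if "thyroid" in p: return "Thyroid"
--     if any(k in p for k in ["esophageal","oesophageal","esophagus","oesophagus"]): return "Esophageal"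
--     if any(k in p for k in ["testicular","germ cell"]): return "Testicular"
--     if any(k in p for k in ["liver","hepatic","intrahepatic bile duct","bile duct","gallbladder","cholangiocarcinoma"]): return "Hepatobiliary"
--     if any(k in p for k in ["brain","nervous system","glioma","glioblastoma"]): return "Brain/CNS"
--     if any(k in p for k in ["oropharynx","hypopharynx","larynx","pharynx","oral cavity","tongue","head and neck","salivary"]): return "Head & Neck"
--     if p.strip() in {"cancer"} or "cancer (" in p or "multiple cancers" in p or "hormone-sensitive cancer" in p:
--         return "Other/General"
--     return "Other/General"
-- ===== SOURCE B (Python) =====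
-- # B: instead of an ordered first-match cascade, test EVERY keyword against the lowered
-- # string via a flat keyword -> (rank, category) map and keep a running minimum rank
-- # (argmin aggregation); equal ranks always carry the same category, so the minimum-rank
-- # match equals the first branch A would fire.
-- _RANKED = {
--     "prostate": (0, "Prostate"),
--     "breast": (1, "Breast"),
--     "colorectal": (2, "Colorectal"), "colon": (2, "Colorectal"), "rectal": (2, "Colorectal"),
--     "rectum": (2, "Colorectal"), "crc": (2, "Colorectal"),
--     "ovarian": (3, "Ovarian"), "ovary": (3, "Ovarian"),
--     "nsclc": (4, "Lung"), "non-small cell lung": (4, "Lung"), "small-cell lung": (4, "Lung"),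
--     "sclc": (4, "Lung"), "lung": (4, "Lung"), "bronchus": (4, "Lung"),
--     "skin": (5, "Skin"), "keratinocyte": (5, "Skin"), "non-melanoma": (5, "Skin"), "melanoma": (5, "Skin"),
--     "gastric": (6, "Gastric"), "stomach": (6, "Gastric"), "cardia": (6, "Gastric"),
--     "pancrea": (7, "Pancreatic"),
--     "cervical": (8, "Cervical"), "cervix": (8, "Cervical"),
--     "endometrial": (9, "Endometrial"),
--     "uterine": (10, "Uterine"), "leiomyoma": (10, "Uterine"),
--     "bladder": (11, "Bladder"),
--     "kidney": (12, "Kidney"), "renal": (12, "Kidney"), "renal pelvis": (12, "Kidney"),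
--     "thyroid": (13, "Thyroid"),
--     "esophageal": (14, "Esophageal"), "oesophageal": (14, "Esophageal"),
--     "esophagus": (14, "Esophageal"), "oesophagus": (14, "Esophageal"),
--     "testicular": (15, "Testicular"), "germ cell": (15, "Testicular"),
--     "liver": (16, "Hepatobiliary"), "hepatic": (16, "Hepatobiliary"),
--     "intrahepatic bile duct": (16, "Hepatobiliary"), "bile duct": (16, "Hepatobiliary"),
--     "gallbladder": (16, "Hepatobiliary"), "cholangiocarcinoma": (16, "Hepatobiliary"),
--     "brain": (17, "Brain/CNS"), "nervous system": (17, "Brain/CNS"),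
--     "glioma": (17, "Brain/CNS"), "glioblastoma": (17, "Brain/CNS"),
--     "oropharynx": (18, "Head & Neck"), "hypopharynx": (18, "Head & Neck"),
--     "larynx": (18, "Head & Neck"), "pharynx": (18, "Head & Neck"),
--     "oral cavity": (18, "Head & Neck"), "tongue": (18, "Head & Neck"),
--     "head and neck": (18, "Head & Neck"), "salivary": (18, "Head & Neck"),
-- }
--
-- def map_cancer_type(phenotype_raw: str) -> str:
--     if not isinstance(phenotype_raw, str):
--         return "Other/General"
--     p = phenotype_raw.lower()
--     best = None
--     for kw, rc in _RANKED.items():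
--         if kw in p and (best is None or rc[0] < best[0]):
--             best = rc
--     return "Other/General" if best is None else best[1]
-- ===== Notes on version B (the rewrite author's own statement) =====
-- stated objective: alternative
-- what changed: Replaces the ordered first-match if-cascade by a single flat keyword->(rank,category) map whose entries are ALL tested (no short-circuit), keeping a running minimum-rank match; the minimum-rank match coincides with A's first firing branch, and A's dead final special-case block (all paths return the fallback) is dropped.
import Mathlib
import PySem

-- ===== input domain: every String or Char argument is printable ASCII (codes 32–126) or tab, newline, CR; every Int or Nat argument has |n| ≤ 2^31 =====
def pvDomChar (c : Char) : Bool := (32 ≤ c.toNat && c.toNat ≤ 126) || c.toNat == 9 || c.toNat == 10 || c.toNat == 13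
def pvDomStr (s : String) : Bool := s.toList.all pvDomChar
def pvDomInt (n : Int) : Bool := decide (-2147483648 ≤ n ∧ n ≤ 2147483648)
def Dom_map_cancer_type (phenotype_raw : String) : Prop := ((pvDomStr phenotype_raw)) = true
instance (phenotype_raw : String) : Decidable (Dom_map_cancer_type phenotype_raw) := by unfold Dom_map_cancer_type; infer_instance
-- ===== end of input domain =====

-- B replaces A's ordered first-match cascade by a full scan of a flat keyword->(rank,category)
-- map keeping a running minimum-rank match (alternative decomposition); behaviour is identical.

-- ===== PORT A =====
def map_cancer_type (phenotype_raw : String) : String :=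
  let p := PySem.Str.lower phenotype_raw
  if PySem.Str.isIn "prostate" p then "Prostate" else
  if PySem.Str.isIn "breast" p then "Breast" else
  if (["colorectal","colon","rectal","rectum","crc"] : List String).any (fun k => PySem.Str.isIn k p) then "Colorectal" else
  if (["ovarian","ovary"] : List String).any (fun k => PySem.Str.isIn k p) then "Ovarian" else
  if (["nsclc","non-small cell lung","small-cell lung","sclc","lung","bronchus"] : List String).any (fun k => PySem.Str.isIn k p) then "Lung" else
  if (["skin","keratinocyte","non-melanoma","melanoma"] : List String).any (fun k => PySem.Str.isIn k p) then "Skin" else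
  if (["gastric","stomach","cardia"] : List String).any (fun k => PySem.Str.isIn k p) then "Gastric" else
  if PySem.Str.isIn "pancrea" p then "Pancreatic" else
  if (["cervical","cervix"] : List String).any (fun k => PySem.Str.isIn k p) then "Cervical" else
  if PySem.Str.isIn "endometrial" p then "Endometrial" else
  if (["uterine","leiomyoma"] : List String).any (fun k => PySem.Str.isIn k p) then "Uterine" else
  if PySem.Str.isIn "bladder" p then "Bladder" else
  if (["kidney","renal","renal pelvis"] : List String).any (fun k => PySem.Str.isIn k p) then "Kidney" else
  if PySem.Str.isIn "thyroid" p then "Thyroid" else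
  if (["esophageal","oesophageal","esophagus","oesophagus"] : List String).any (fun k => PySem.Str.isIn k p) then "Esophageal" else
  if (["testicular","germ cell"] : List String).any (fun k => PySem.Str.isIn k p) then "Testicular" else
  if (["liver","hepatic","intrahepatic bile duct","bile duct","gallbladder","cholangiocarcinoma"] : List String).any (fun k => PySem.Str.isIn k p) then "Hepatobiliary" else
  if (["brain","nervous system","glioma","glioblastoma"] : List String).any (fun k => PySem.Str.isIn k p) then "Brain/CNS" else
  if (["oropharynx","hypopharynx","larynx","pharynx","oral cavity","tongue","head and neck","salivary"] : List String).any (fun k => PySem.Str.isIn k p) then "Head & Neck" else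
  if PySem.Str.strip p == "cancer" || PySem.Str.isIn "cancer (" p || PySem.Str.isIn "multiple cancers" p || PySem.Str.isIn "hormone-sensitive cancer" p then
    "Other/General"
  else "Other/General"

-- ===== PORT B =====
-- the flat dict _RANKED of Source B, in insertion order: keyword -> (rank, category)
def pvRanked : List (String × Nat × String) := [
  ("prostate", 0, "Prostate"),
  ("breast", 1, "Breast"),
  ("colorectal", 2, "Colorectal"), ("colon", 2, "Colorectal"), ("rectal", 2, "Colorectal"),
  ("rectum", 2, "Colorectal"), ("crc", 2, "Colorectal"),
  ("ovarian", 3, "Ovarian"), ("ovary", 3, "Ovarian"),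
  ("nsclc", 4, "Lung"), ("non-small cell lung", 4, "Lung"), ("small-cell lung", 4, "Lung"),
  ("sclc", 4, "Lung"), ("lung", 4, "Lung"), ("bronchus", 4, "Lung"),
  ("skin", 5, "Skin"), ("keratinocyte", 5, "Skin"), ("non-melanoma", 5, "Skin"), ("melanoma", 5, "Skin"),
  ("gastric", 6, "Gastric"), ("stomach", 6, "Gastric"), ("cardia", 6, "Gastric"),
  ("pancrea", 7, "Pancreatic"),
  ("cervical", 8, "Cervical"), ("cervix", 8, "Cervical"),
  ("endometrial", 9, "Endometrial"),
  ("uterine", 10, "Uterine"), ("leiomyoma", 10, "Uterine"),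
  ("bladder", 11, "Bladder"),
  ("kidney", 12, "Kidney"), ("renal", 12, "Kidney"), ("renal pelvis", 12, "Kidney"),
  ("thyroid", 13, "Thyroid"),
  ("esophageal", 14, "Esophageal"), ("oesophageal", 14, "Esophageal"),
  ("esophagus", 14, "Esophageal"), ("oesophagus", 14, "Esophageal"),
  ("testicular", 15, "Testicular"), ("germ cell", 15, "Testicular"),
  ("liver", 16, "Hepatobiliary"), ("hepatic", 16, "Hepatobiliary"),
  ("intrahepatic bile duct", 16, "Hepatobiliary"), ("bile duct", 16, "Hepatobiliary"),
  ("gallbladder", 16, "Hepatobiliary"), ("cholangiocarcinoma", 16, "Hepatobiliary"),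
  ("brain", 17, "Brain/CNS"), ("nervous system", 17, "Brain/CNS"),
  ("glioma", 17, "Brain/CNS"), ("glioblastoma", 17, "Brain/CNS"),
  ("oropharynx", 18, "Head & Neck"), ("hypopharynx", 18, "Head & Neck"),
  ("larynx", 18, "Head & Neck"), ("pharynx", 18, "Head & Neck"),
  ("oral cavity", 18, "Head & Neck"), ("tongue", 18, "Head & Neck"),
  ("head and neck", 18, "Head & Neck"), ("salivary", 18, "Head & Neck")]

-- the body of Source B's for-loop: update the running minimum-rank match
def pvStep (p : String) (best : Option (Nat × String)) (e : String × Nat × String) : Option (Nat × String) :=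
  if PySem.Str.isIn e.1 p && (match best with | none => true | some b => decide (e.2.1 < b.1)) then some e.2 else best

-- Source B's final 'return "Other/General" if best is None else best[1]'
def pvOut : Option (Nat × String) → String
  | none => "Other/General"
  | some b => b.2

def map_cancer_type_alt (phenotype_raw : String) : String :=
  let p := PySem.Str.lower phenotype_raw
  pvOut (pvRanked.foldl (pvStep p) none)

-- ===== PRECONDITION & SPEC =====
def Spec_map_cancer_type (phenotype_raw : String) (out : String) : Prop := out = map_cancer_type_alt phenotype_raw
instance (phenotype_raw : String) (out : String) : Decidable (Spec_map_cancer_type phenotype_raw out) := by unfold Spec_map_cancer_type; infer_instance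

-- ===== CLAIM (what is proved, stated in full; the proofs are below) =====
def Claim_equal_map_cancer_type : Prop := ∀ (phenotype_raw : String), Dom_map_cancer_type phenotype_raw → Spec_map_cancer_type phenotype_raw (map_cancer_type phenotype_raw)

-- ===== LEMMAS AND PROOFS =====

-- once a match with minimal rank is held, later entries (of no smaller rank) never replace it
theorem pvFold_stuck (p : String) (b : Nat × String) :
    ∀ l : List (String × Nat × String), (∀ e ∈ l, b.1 ≤ e.2.1) →
      l.foldl (pvStep p) (some b) = some b := by
  intro l
  induction l with
  | nil => intro _; rfl
  | cons e t ih =>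
    intro h
    have hb : b.1 ≤ e.2.1 := h e (List.mem_cons_self)
    have hstep : pvStep p (some b) e = some b := by
      simp [pvStep, Nat.not_lt.mpr hb]
    rw [List.foldl_cons, hstep]
    exact ih (fun x hx => h x (List.mem_cons_of_mem _ hx))

-- over a list whose ranks are nondecreasing, the running-minimum fold returns the first match
theorem pvFold_find (p : String) :
    ∀ l : List (String × Nat × String),
      List.Pairwise (fun a b => a.2.1 ≤ b.2.1) l →
      l.foldl (pvStep p) none =
        (l.find? (fun e => PySem.Str.isIn e.1 p)).map (fun e => e.2) := by
  intro l
  induction l with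
  | nil => intro _; rfl
  | cons e t ih =>
    intro hpw
    rcases List.pairwise_cons.mp hpw with ⟨he, ht⟩
    rw [List.foldl_cons, List.find?_cons]
    by_cases h : PySem.Str.isIn e.1 p
    · have hstep : pvStep p none e = some e.2 := by unfold pvStep; rw [h]; rfl
      rw [hstep, h, pvFold_stuck p e.2 t he]
      rfl
    · have hfalse : PySem.Str.isIn e.1 p = false := by
        cases hb : PySem.Str.isIn e.1 p
        · rfl
        · exact absurd hb h
      have hstep : pvStep p none e = none := by unfold pvStep; rw [hfalse]; rfl
      rw [hstep, hfalse]
      exact ih ht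

theorem find?_cons_if {α : Type} (p : α → Bool) (a : α) (l : List α) :
    List.find? p (a :: l) = if p a then some a else List.find? p l := by
  rw [List.find?_cons]; cases p a <;> simp

theorem if_or {α : Type} (a b : Bool) (x y : α) :
    (if a || b then x else y) = if a then x else if b then x else y := by
  cases a <;> cases b <;> simp

theorem pvOut_some (b : Nat × String) : pvOut (some b) = b.2 := rfl
theorem pvOut_none : pvOut none = "Other/General" := rfl

theorem pvRanked_sorted : List.Pairwise (fun a b : String × Nat × String => a.2.1 ≤ b.2.1) pvRanked := by
  decide

-- ===== VERDICT (by name: the statement is the Claim_ definition above) =====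
theorem map_cancer_type_spec : Claim_equal_map_cancer_type := by
  intro s _
  show map_cancer_type s = map_cancer_type_alt s
  show map_cancer_type s = pvOut (pvRanked.foldl (pvStep (PySem.Str.lower s)) none)
  rw [pvFold_find _ pvRanked pvRanked_sorted]
  unfold map_cancer_type pvRanked
  simp only [find?_cons_if, List.find?_nil, List.any_cons, List.any_nil, Bool.or_false, if_or,
    apply_ite (Option.map (fun e : String × Nat × String => e.2)),
    apply_ite pvOut, Option.map_some, Option.map_none,
    pvOut_some, pvOut_none, ite_self]
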